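-- pv_equiv track=rewrite | github.com/rbithin10/adaptivhealth | app/services/natural_language_alerts.py | _simplify_driver
-- ===== SOURCE A (Python) =====
-- def _simplify_driver(driver: str) -> str:
--     """Simplify risk drivers into plain language."""
--     replacements = {
--         "hr": "heart rate",
--         "spo2": "blood oxygen",
--         "bp": "blood pressure",
--     }
--     text = driver
--     for k, v in replacements.items():
--         text = text.replace(k, v)
--     return text
-- ===== SOURCE B (Python) =====
-- def _simplify_driver(driver: str) -> str:
--     """Simplify risk drivers into plain language (single left-to-right scan)."""
--     replacements = {
--         "hr": "heart rate",
--         "spo2": "blood oxygen",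
--         "bp": "blood pressure",
--     }
--     out = []
--     i = 0
--     n = len(driver)
--     while i < n:
--         for k, v in replacements.items():
--             if driver.startswith(k, i):
--                 out.append(v)
--                 i += len(k)
--                 break
--         else:
--             out.append(driver[i])
--             i += 1
--     return "".join(out)
-- ===== Notes on version B (the rewrite author's own statement) =====
-- stated objective: alternative
-- what changed: A makes three sequential full-string replace passes (one per abbreviation); B makes a single left-to-right scan that tries the three keys at each position and resolves all substitutions in one traversal.
import Mathlib
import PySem

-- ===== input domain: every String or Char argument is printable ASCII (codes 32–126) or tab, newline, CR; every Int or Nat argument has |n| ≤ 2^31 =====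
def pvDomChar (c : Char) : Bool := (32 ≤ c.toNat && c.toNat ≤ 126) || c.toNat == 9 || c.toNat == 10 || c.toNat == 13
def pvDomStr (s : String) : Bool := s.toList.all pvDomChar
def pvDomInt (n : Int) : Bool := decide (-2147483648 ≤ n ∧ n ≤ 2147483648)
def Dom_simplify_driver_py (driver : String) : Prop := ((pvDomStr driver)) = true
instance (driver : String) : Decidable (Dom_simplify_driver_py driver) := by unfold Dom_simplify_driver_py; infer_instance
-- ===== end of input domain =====

-- B replaces A's three sequential full-string replace passes by one left-to-right scan that
-- resolves all three substitutions in a single traversal (objective: alternative).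

-- ===== PORT A =====
-- literal transliteration of A: a dict literal, then one str.replace per (k, v) item, in order
def simplify_driver_py (driver : String) : String :=
  let replacements : PySem.Dict String String :=
    ((PySem.Dict.empty.insert "hr" "heart rate").insert "spo2" "blood oxygen").insert
      "bp" "blood pressure"
  let text := driver
  replacements.items.foldl (fun text kv => PySem.Str.replace text kv.1 kv.2) text

-- ===== PORT B =====
-- port of Source B's while-loop: at each position try the keys in dict order; on a match emit the
-- replacement and jump past the key, otherwise copy one character (index loop → recursion on
-- the remaining suffix; str.startswith(k, i) → List.isPrefixOf on the suffix; exact)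
def pvScanB : List Char → List Char
  | [] => []
  | c :: t =>
    if List.isPrefixOf ['h', 'r'] (c :: t) then
      "heart rate".toList ++ pvScanB (List.drop 1 t)
    else if List.isPrefixOf ['s', 'p', 'o', '2'] (c :: t) then
      "blood oxygen".toList ++ pvScanB (List.drop 3 t)
    else if List.isPrefixOf ['b', 'p'] (c :: t) then
      "blood pressure".toList ++ pvScanB (List.drop 1 t)
    else
      c :: pvScanB t
  termination_by l => l.length
  decreasing_by all_goals (simp [List.length_drop]; try omega)

def simplify_driver_py_alt (driver : String) : String :=
  String.ofList (pvScanB driver.toList)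

-- ===== PRECONDITION & SPEC =====
def Spec_simplify_driver_py (driver : String) (out : String) : Prop := out = simplify_driver_py_alt driver
instance (driver : String) (out : String) : Decidable (Spec_simplify_driver_py driver out) := by unfold Spec_simplify_driver_py; infer_instance

-- ===== CLAIM (what is proved, stated in full; the proofs are below) =====
def Claim_equal_simplify_driver_py : Prop := ∀ (driver : String), Dom_simplify_driver_py driver → Spec_simplify_driver_py driver (simplify_driver_py driver)

-- ===== LEMMAS AND PROOFS =====

-- structural characterisation of PySem.Chars.replace for a non-empty pattern o0 :: orest
def pvRep (o0 : Char) (orest nw : List Char) : List Char → List Char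
  | [] => []
  | c :: t =>
    if List.isPrefixOf (o0 :: orest) (c :: t) then
      nw ++ pvRep o0 orest nw (List.drop orest.length t)
    else
      c :: pvRep o0 orest nw t
  termination_by l => l.length
  decreasing_by all_goals (simp [List.length_drop]; try omega)

theorem pvRep_go (o0 : Char) (orest nw : List Char) :
    ∀ (fuel : Nat) (l acc : List Char), l.length ≤ fuel →
      PySem.Chars.replace.go (o0 :: orest) nw fuel l acc = acc.reverse ++ pvRep o0 orest nw l := by
  intro fuel
  induction fuel with
  | zero =>
      intro l acc h
      have : l = [] := List.eq_nil_of_length_eq_zero (Nat.le_zero.mp h)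
      subst this
      simp [PySem.Chars.replace.go, pvRep]
  | succ n ih =>
      intro l acc h
      cases l with
      | nil => simp [PySem.Chars.replace.go, pvRep]
      | cons c t =>
        rw [PySem.Chars.replace.go]
        by_cases hp : List.isPrefixOf (o0 :: orest) (c :: t)
        · rw [if_pos hp, pvRep, if_pos hp]
          have hd : List.drop (o0 :: orest).length (c :: t) = List.drop orest.length t := by
            simp
          rw [hd, ih _ _ (by simp at h ⊢; omega)]
          simp
        · rw [if_neg hp, pvRep, if_neg hp, ih _ _ (by simp at h ⊢; omega)]
          simp

theorem pvReplace_eq (o0 : Char) (orest nw : List Char) (l : List Char) :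
    PySem.Chars.replace l (o0 :: orest) nw = pvRep o0 orest nw l := by
  rw [PySem.Chars.replace]
  simp only [List.isEmpty_cons, if_false, Bool.false_eq_true]
  exact pvRep_go o0 orest nw l.length l [] le_rfl

-- a segment not containing the pattern's first character passes through unchanged
theorem pvRep_pass (o0 : Char) (orest nw : List Char) (p x : List Char) (h : o0 ∉ p) :
    pvRep o0 orest nw (p ++ x) = p ++ pvRep o0 orest nw x := by
  induction p with
  | nil => rfl
  | cons c p ih =>
      have hc : c ≠ o0 := fun hh => h (by simp [hh])
      have hneg : ¬ List.isPrefixOf (o0 :: orest) (c :: (p ++ x)) := by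
        intro hp
        rcases List.isPrefixOf_iff_prefix.mp hp with ⟨t2, ht⟩
        exact hc (by injection ht with h1 _; exact h1.symm)
      rw [List.cons_append, pvRep, if_neg hneg, ih (fun hm => h (List.mem_cons_of_mem _ hm))]
      simp

-- replacement with pattern head o0 and new-text head d leaves prefixes avoiding both intact
theorem pvRep_prefIff (o0 : Char) (orest : List Char) (d : Char) (nw' : List Char) :
    ∀ (t q : List Char), o0 ∉ q → d ∉ q →
      (q <+: pvRep o0 orest (d :: nw') t ↔ q <+: t) := by
  intro t
  induction t with
  | nil => intro q _ _; rw [pvRep]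
  | cons c t' ih =>
      intro q h1 h2
      by_cases hp : List.isPrefixOf (o0 :: orest) (c :: t')
      · rw [pvRep, if_pos hp]
        cases q with
        | nil => simp
        | cons a q' =>
          constructor
          · intro hq
            rcases hq with ⟨t2, ht⟩
            exact (h2 (by injection ht with hh _; simp [← hh])).elim
          · intro hq
            rcases List.isPrefixOf_iff_prefix.mp hp with ⟨t3, ht3⟩
            rcases hq with ⟨t2, ht⟩
            rw [← ht3] at ht
            have ha : a = o0 := by
              have := congrArg (fun l => l[0]?) ht
              simpa using this
            exact (h1 (by simp [ha])).elim
      · rw [pvRep, if_neg hp]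
        cases q with
        | nil => simp
        | cons a q' =>
          constructor
          · intro hq
            rcases hq with ⟨t2, ht⟩
            injection ht with hh htl
            subst hh
            rcases (ih q' (fun hm => h1 (by simp [hm])) (fun hm => h2 (by simp [hm]))).mp
              ⟨t2, htl⟩ with ⟨t3, ht3⟩
            exact ⟨t3, by rw [List.cons_append, ht3]⟩
          · intro hq
            rcases hq with ⟨t2, ht⟩
            injection ht with hh htl
            subst hh
            rcases (ih q' (fun hm => h1 (by simp [hm])) (fun hm => h2 (by simp [hm]))).mpr
              ⟨t2, htl⟩ with ⟨t3, ht3⟩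
            exact ⟨t3, by rw [List.cons_append, ht3]⟩

-- abbreviations for the three concrete passes
def pvRepHr : List Char → List Char := pvRep 'h' ['r'] "heart rate".toList
def pvRepSp : List Char → List Char := pvRep 's' ['p', 'o', '2'] "blood oxygen".toList
def pvRepBp : List Char → List Char := pvRep 'b' ['p'] "blood pressure".toList

-- "blood oxygen" passes through the bp replacement unchanged (its 'b' is not followed by 'p')
theorem pvRepBp_bloodOxygen (x : List Char) :
    pvRepBp ("blood oxygen".toList ++ x) = "blood oxygen".toList ++ pvRepBp x := by
  have h1 : "blood oxygen".toList = 'b' :: "lood oxygen".toList := rfl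
  have eL : "lood oxygen".toList = 'l' :: "ood oxygen".toList := rfl
  have hneg : ¬ List.isPrefixOf ('b' :: ['p']) ('b' :: ("lood oxygen".toList ++ x)) := by
    rw [eL]
    simp [List.isPrefixOf]
  rw [h1, List.cons_append, pvRepBp, pvRep, if_neg hneg,
    pvRep_pass 'b' ['p'] "blood pressure".toList "lood oxygen".toList x (by decide)]
  rfl

-- the fusion theorem: three sequential passes equal one simultaneous scan
theorem pvFused (n : Nat) : ∀ l : List Char, l.length ≤ n →
    pvRepBp (pvRepSp (pvRepHr l)) = pvScanB l := by
  induction n with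
  | zero =>
      intro l h
      have : l = [] := List.eq_nil_of_length_eq_zero (Nat.le_zero.mp h)
      subst this
      simp [pvRepHr, pvRepSp, pvRepBp, pvRep, pvScanB]
  | succ n ih =>
    intro l hl
    cases l with
    | nil => simp [pvRepHr, pvRepSp, pvRepBp, pvRep, pvScanB]
    | cons c t =>
      rw [pvScanB]
      by_cases h1 : List.isPrefixOf ['h', 'r'] (c :: t)
      · rcases List.isPrefixOf_iff_prefix.mp h1 with ⟨t2, ht⟩
        simp only [List.cons_append, List.nil_append, List.cons.injEq] at ht
        obtain ⟨hc1, hc2⟩ := ht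
        subst hc1; subst hc2
        rw [if_pos h1, pvRepHr, pvRep, if_pos h1]
        simp only [List.length_cons, List.length_nil, List.drop_succ_cons, List.drop_zero]
        rw [← pvRepHr, pvRepSp,
          pvRep_pass 's' ['p', 'o', '2'] "blood oxygen".toList "heart rate".toList _ (by decide),
          ← pvRepSp, pvRepBp,
          pvRep_pass 'b' ['p'] "blood pressure".toList "heart rate".toList _ (by decide),
          ← pvRepBp, ih t2 (by simp at hl; omega)]
      · by_cases h2 : List.isPrefixOf ['s', 'p', 'o', '2'] (c :: t)
        · rcases List.isPrefixOf_iff_prefix.mp h2 with ⟨t2, ht⟩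
          simp only [List.cons_append, List.nil_append, List.cons.injEq] at ht
          obtain ⟨hc1, hc2⟩ := ht
          subst hc1; subst hc2
          rw [if_neg h1, if_pos h2, pvRepHr]
          have hpass : ('s' :: 'p' :: 'o' :: '2' :: t2) = ['s','p','o','2'] ++ t2 := rfl
          rw [hpass, pvRep_pass 'h' ['r'] "heart rate".toList ['s','p','o','2'] t2 (by decide),
            ← pvRepHr]
          simp only [List.cons_append, List.nil_append]
          rw [pvRepSp, pvRep, if_pos (by simp [List.isPrefixOf] :
            List.isPrefixOf ['s','p','o','2'] ('s'::'p'::'o'::'2'::pvRepHr t2) = true)]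
          simp only [List.length_cons, List.length_nil, List.drop_succ_cons, List.drop_zero]
          rw [← pvRepSp, pvRepBp_bloodOxygen, ih t2 (by simp at hl; omega)]
        · by_cases h3 : List.isPrefixOf ['b', 'p'] (c :: t)
          · rcases List.isPrefixOf_iff_prefix.mp h3 with ⟨t2, ht⟩
            simp only [List.cons_append, List.nil_append, List.cons.injEq] at ht
            obtain ⟨hc1, hc2⟩ := ht
            subst hc1; subst hc2
            rw [if_neg h1, if_neg h2, if_pos h3, pvRepHr]
            have hpass : ('b' :: 'p' :: t2) = ['b','p'] ++ t2 := rfl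
            rw [hpass, pvRep_pass 'h' ['r'] "heart rate".toList ['b','p'] t2 (by decide),
              ← pvRepHr, pvRepSp,
              pvRep_pass 's' ['p','o','2'] "blood oxygen".toList ['b','p'] _ (by decide),
              ← pvRepSp]
            simp only [List.cons_append, List.nil_append]
            rw [pvRepBp, pvRep, if_pos (by simp [List.isPrefixOf] :
              List.isPrefixOf ['b','p'] ('b'::'p'::pvRepSp (pvRepHr t2)) = true)]
            simp only [List.length_cons, List.length_nil, List.drop_succ_cons, List.drop_zero]
            rw [← pvRepBp, ih t2 (by simp at hl; omega)]
          · -- no key matches at this position: every pass copies c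
            rw [if_neg h1, if_neg h2, if_neg h3, pvRepHr, pvRep, if_neg h1, ← pvRepHr]
            have eH : "heart rate".toList = 'h' :: "eart rate".toList := rfl
            have eO : "blood oxygen".toList = 'b' :: "lood oxygen".toList := rfl
            have hS : ¬ List.isPrefixOf ['s','p','o','2'] (c :: pvRepHr t) := by
              intro hp
              rcases List.isPrefixOf_iff_prefix.mp hp with ⟨t2, ht⟩
              simp only [List.cons_append, List.nil_append, List.cons.injEq] at ht
              obtain ⟨hc1, hc2⟩ := ht
              have : ['p','o','2'] <+: pvRepHr t := ⟨t2, hc2⟩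
              rw [pvRepHr, eH] at this
              have := (pvRep_prefIff 'h' ['r'] 'h' "eart rate".toList t ['p','o','2']
                (by decide) (by decide)).mp this
              rcases this with ⟨t3, ht3⟩
              exact h2 (List.isPrefixOf_iff_prefix.mpr ⟨t3, by rw [← hc1, ← ht3]; rfl⟩)
            rw [pvRepSp, pvRep, if_neg hS, ← pvRepSp]
            have hB : ¬ List.isPrefixOf ['b','p'] (c :: pvRepSp (pvRepHr t)) := by
              intro hp
              rcases List.isPrefixOf_iff_prefix.mp hp with ⟨t2, ht⟩
              simp only [List.cons_append, List.nil_append, List.cons.injEq] at ht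
              obtain ⟨hc1, hc2⟩ := ht
              have : ['p'] <+: pvRepSp (pvRepHr t) := ⟨t2, hc2⟩
              rw [pvRepSp, eO] at this
              have := (pvRep_prefIff 's' ['p','o','2'] 'b' "lood oxygen".toList (pvRepHr t) ['p']
                (by decide) (by decide)).mp this
              rw [pvRepHr, eH] at this
              have := (pvRep_prefIff 'h' ['r'] 'h' "eart rate".toList t ['p']
                (by decide) (by decide)).mp this
              rcases this with ⟨t3, ht3⟩
              exact h3 (List.isPrefixOf_iff_prefix.mpr ⟨t3, by rw [← hc1, ← ht3]; rfl⟩)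
            rw [pvRepBp, pvRep, if_neg hB, ← pvRepBp, ih t (by simp at hl; omega)]

-- ===== VERDICT (by name: the statement is the Claim_ definition above) =====
theorem simplify_driver_py_spec : Claim_equal_simplify_driver_py := by
  intro driver _
  show simplify_driver_py driver = simplify_driver_py_alt driver
  have hA : simplify_driver_py driver =
      PySem.Str.replace (PySem.Str.replace (PySem.Str.replace driver "hr" "heart rate")
        "spo2" "blood oxygen") "bp" "blood pressure" := rfl
  apply String.toList_inj.mp
  rw [hA]
  simp only [PySem.Str.toList_replace, simplify_driver_py_alt, String.toList_ofList]
  have e1 : "hr".toList = 'h' :: ['r'] := rfl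
  have e2 : "spo2".toList = 's' :: ['p','o','2'] := rfl
  have e3 : "bp".toList = 'b' :: ['p'] := rfl
  rw [e1, e2, e3, pvReplace_eq, pvReplace_eq, pvReplace_eq]
  exact pvFused driver.toList.length driver.toList le_rfl
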